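-- pv_equiv track=rewrite | github.com/karlsITsupport/entryhub | server/app.py | extract_last_scan
-- ===== SOURCE A (Python) =====
-- def extract_last_scan(lines: list[str]) -> list[str] | None:
--     end = None
--     start = None
--
--     # 1) Ende finden
--     for i in range(len(lines) - 1, -1, -1):
--         if "INFO Main:100 - wait for barcode" in lines[i]:
--             end = i
--             break
--
--     if end is None:
--         return None
--
--     # 2) Start finden (davor!)
--     for j in range(end - 1, -1, -1):
--         if "INFO EntryClient:701 - got barcode" in lines[j]:
--             start = j
--             break
--
--     if start is None:
--         return None
--
--     return lines[start:end]
-- ===== SOURCE B (Python) =====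
-- END_MARK = "INFO Main:100 - wait for barcode"
-- START_MARK = "INFO EntryClient:701 - got barcode"
--
-- def extract_last_scan(lines: list[str]) -> list[str] | None:
--     # Single forward pass: track the most recent start-marker index; whenever an
--     # end marker is seen, record (last_start_so_far, i). The last candidate wins.
--     last_start = None
--     cand = None
--     for i, line in enumerate(lines):
--         if END_MARK in line:
--             cand = (last_start, i)
--         if START_MARK in line:
--             last_start = i
--     if cand is None:
--         return None
--     s, e = cand
--     if s is None:
--         return None
--     return lines[s:e]
-- ===== Notes on version B (the rewrite author's own statement) =====
-- stated objective: alternative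
-- what changed: Replaces the two backward scans (last end marker, then last start marker before it) by a single forward pass that maintains the most recent start index and records a (start,end) candidate at every end-marker line.
import Mathlib
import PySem

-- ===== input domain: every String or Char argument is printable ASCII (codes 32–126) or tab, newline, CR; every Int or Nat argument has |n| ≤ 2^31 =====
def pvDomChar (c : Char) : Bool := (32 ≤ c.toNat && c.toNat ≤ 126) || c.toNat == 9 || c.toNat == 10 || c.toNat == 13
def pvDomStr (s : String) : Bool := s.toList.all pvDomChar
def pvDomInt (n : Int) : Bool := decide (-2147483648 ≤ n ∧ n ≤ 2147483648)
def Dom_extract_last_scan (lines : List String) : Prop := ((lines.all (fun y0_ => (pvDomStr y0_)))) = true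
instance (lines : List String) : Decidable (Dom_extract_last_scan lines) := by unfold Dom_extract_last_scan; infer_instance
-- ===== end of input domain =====

-- B replaces A's two backward scans by a single forward pass keeping running state; same cost, different traversal.

def endMarker : String := "INFO Main:100 - wait for barcode"
def startMarker : String := "INFO EntryClient:701 - got barcode"

-- ===== PORT A =====
-- backward loop 'for i in range(hi-1,-1,-1): if marker in lines[i]: return i' (break = return here)
def scanDownA (lines : List String) (marker : String) : Nat → Option Nat
  | 0 => none
  | n+1 => if PySem.Str.isIn marker (lines.getD n "") then some n else scanDownA lines marker n

def extract_last_scan (lines : List String) : Option (List String) :=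
  match scanDownA lines endMarker lines.length with
  | none => none
  | some e =>
    match scanDownA lines startMarker e with
    | none => none
    | some s => some (PySem.List.slice lines (some (s : Int)) (some (e : Int)))

-- ===== PORT B =====
-- loop body of 'for i, line in enumerate(lines)': state = (last_start, cand)
def stepB (st : Option Int × Option (Option Int × Int)) (p : Int × String) :
    Option Int × Option (Option Int × Int) :=
  let st1 := if PySem.Str.isIn endMarker p.2 then (st.1, some (st.1, p.1)) else st
  if PySem.Str.isIn startMarker p.2 then (some p.1, st1.2) else st1

def extract_last_scan_alt (lines : List String) : Option (List String) :=
  match ((PySem.List.enumerate lines 0).foldl stepB (none, none)).2 with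
  | none => none
  | some (none, _) => none
  | some (some s, e) => some (PySem.List.slice lines (some s) (some e))

-- ===== PRECONDITION & SPEC =====
def Spec_extract_last_scan (lines : List String) (out : Option (List String)) : Prop := out = extract_last_scan_alt lines
instance (lines : List String) (out : Option (List String)) : Decidable (Spec_extract_last_scan lines out) := by unfold Spec_extract_last_scan; infer_instance

-- ===== CLAIM (what is proved, stated in full; the proofs are below) =====
def Claim_equal_extract_last_scan : Prop := ∀ (lines : List String), Dom_extract_last_scan lines → Spec_extract_last_scan lines (extract_last_scan lines)

-- ===== LEMMAS AND PROOFS =====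

theorem scanDownA_lt {lines : List String} {m : String} {n e : Nat}
    (h : scanDownA lines m n = some e) : e < n := by
  induction n with
  | zero => simp [scanDownA] at h
  | succ k ih =>
    simp only [scanDownA] at h
    split at h
    · simp only [Option.some.injEq] at h; omega
    · exact Nat.lt_succ_of_lt (ih h)

theorem scanDownA_append {ys : List String} {y m : String} {k : Nat}
    (hk : k ≤ ys.length) : scanDownA (ys ++ [y]) m k = scanDownA ys m k := by
  induction k with
  | zero => rfl
  | succ j ih =>
    have hj : j < ys.length := hk
    simp only [scanDownA, ih (Nat.le_of_lt hj), List.getD_append _ _ _ _ hj]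

-- the fold invariant: the forward pass computes exactly what A's two backward scans compute
theorem foldB_inv (lines : List String) (a0 : Option Int) (c0 : Option (Option Int × Int)) :
    (PySem.List.enumerate lines 0).foldl stepB (a0, c0) =
      ((match scanDownA lines startMarker lines.length with
        | none => a0
        | some s => some (s : Int)),
       (match scanDownA lines endMarker lines.length with
        | none => c0
        | some e =>
            some ((match scanDownA lines startMarker e with
                   | none => a0
                   | some s => some (s : Int)), (e : Int)))) := by
  induction lines using List.reverseRecOn generalizing a0 c0 with
  | nil => rfl
  | append_singleton ys y ih =>
    rw [PySem.List.enumerate_append, List.foldl_append, ih]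
    simp only [PySem.List.enumerate, List.foldl, List.length_append, List.length_singleton]
    have hsd : ∀ m, scanDownA (ys ++ [y]) m (ys.length + 1) =
        if PySem.Str.isIn m y then some ys.length else scanDownA ys m ys.length := by
      intro m
      simp [scanDownA, scanDownA_append (le_refl ys.length)]
    rw [hsd, hsd]
    by_cases he : PySem.Str.isIn endMarker y = true <;>
      by_cases hs : PySem.Str.isIn startMarker y = true <;>
        simp only [stepB, he, hs, if_true, Bool.false_eq_true, if_false, zero_add]
    · simp [scanDownA_append (le_refl ys.length)]
    · simp [scanDownA_append (le_refl ys.length)]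
    · cases hE : scanDownA ys endMarker ys.length with
      | none => rfl
      | some e =>
        have := scanDownA_lt hE
        simp [scanDownA_append (by omega : e ≤ ys.length)]
    · cases hE : scanDownA ys endMarker ys.length with
      | none => rfl
      | some e =>
        have := scanDownA_lt hE
        simp [scanDownA_append (by omega : e ≤ ys.length)]

-- ===== VERDICT (by name: the statement is the Claim_ definition above) =====
theorem extract_last_scan_spec : Claim_equal_extract_last_scan := by
  intro lines _
  show extract_last_scan lines = extract_last_scan_alt lines
  unfold extract_last_scan extract_last_scan_alt
  rw [foldB_inv]
  cases hE : scanDownA lines endMarker lines.length with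
  | none => rfl
  | some e =>
    cases hS : scanDownA lines startMarker e with
    | none => simp [hS]
    | some s => simp [hS]
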